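-- pv_equiv track=rewrite | github.com/ZhiHanZ/10601_Machine_Learning | hw3/tagger.py | preprocess_model2
-- ===== SOURCE A (Python) =====
-- def preprocess_model2(allRows):
--     distinctWords = dict()
--     classes, inverseClasses = dict(), dict()
--     for row in allRows:
--         if len(row) != 0:
--             if row[0] not in distinctWords:
--                 distinctWords[row[0]] = len(distinctWords) + 1
--             if row[1] not in classes:
--                 classes[row[1]] = len(classes) + 1
--                 inverseClasses[len(classes)] = row[1]
--     distinctWords['BOS'] = len(distinctWords) + 1
--     distinctWords['EOS'] = len(distinctWords) + 1
--     return (distinctWords, classes, inverseClasses)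
-- ===== SOURCE B (Python) =====
-- def preprocess_model2(allRows):
--     # collect-then-index-then-invert decomposition
--     rows = [r for r in allRows if r]
--     words = list(dict.fromkeys(r[0] for r in rows))
--     classList = list(dict.fromkeys(r[1] for r in rows))
--     distinctWords = {w: i for i, w in enumerate(words, 1)}
--     classes = {c: i for i, c in enumerate(classList, 1)}
--     inverseClasses = {v: k for k, v in classes.items()}
--     distinctWords['BOS'] = len(distinctWords) + 1
--     distinctWords['EOS'] = len(distinctWords) + 1
--     return (distinctWords, classes, inverseClasses)
-- ===== Notes on version B (the rewrite author's own statement) =====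
-- stated objective: alternative
-- what changed: A builds all three dicts in one interleaved loop with membership tests and inline inverse updates; B is a collect-then-index-then-invert pipeline: dedup the word and class columns of the non-empty rows, build each index dict by enumeration from 1, derive inverseClasses by swapping classes, and append BOS/EOS afterwards.
import Mathlib
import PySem

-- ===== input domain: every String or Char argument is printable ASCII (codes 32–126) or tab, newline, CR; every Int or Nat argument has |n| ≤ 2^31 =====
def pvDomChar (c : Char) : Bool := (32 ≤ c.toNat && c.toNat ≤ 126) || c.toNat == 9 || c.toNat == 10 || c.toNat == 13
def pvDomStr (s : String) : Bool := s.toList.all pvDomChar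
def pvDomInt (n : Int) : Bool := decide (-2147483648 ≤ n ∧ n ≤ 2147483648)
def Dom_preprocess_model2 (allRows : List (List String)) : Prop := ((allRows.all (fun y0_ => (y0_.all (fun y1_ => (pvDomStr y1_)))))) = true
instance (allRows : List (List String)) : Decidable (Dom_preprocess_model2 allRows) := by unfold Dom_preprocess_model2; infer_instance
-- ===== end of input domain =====

-- B replaces A's single interleaved dict-building loop by a collect-then-index-then-invert pipeline
-- (dedup the two columns, index each by enumeration, derive the inverse map, append BOS/EOS last);
-- objective: alternative decomposition, same cost.


-- ===== PORT A =====
-- loop body of A: state is (distinctWords, classes, inverseClasses); none = an IndexError happened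
def pvStepA (st : Option (PySem.Dict String Int × PySem.Dict String Int × PySem.Dict Int String))
    (row : List String) :
    Option (PySem.Dict String Int × PySem.Dict String Int × PySem.Dict Int String) :=
  match st with
  | none => none
  | some (dw, cls, inv) =>
    if row.length ≠ 0 then
      match PySem.List.pyGet? row 0 with
      | none => none
      | some w =>
        -- if row[0] not in distinctWords: distinctWords[row[0]] = len(distinctWords) + 1
        let dw' := if dw.contains w then dw else dw.insert w ((dw.size : Int) + 1)
        match PySem.List.pyGet? row 1 with
        | none => none
        | some c =>
          if cls.contains c then some (dw', cls, inv)
          else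
            -- classes[row[1]] = len(classes) + 1 ; inverseClasses[len(classes)] = row[1]
            let cls' := cls.insert c ((cls.size : Int) + 1)
            some (dw', cls', inv.insert ((cls'.size : Int)) c)
    else some (dw, cls, inv)

def preprocess_model2 (allRows : List (List String)) : (List (String × Int)) × (List (String × Int)) × (List (Int × String)) :=
  match allRows.foldl pvStepA (some (PySem.Dict.empty, PySem.Dict.empty, PySem.Dict.empty)) with
  | none => ([], [], [])   -- unreachable under Pre_ (the Python raises IndexError there)
  | some (dw, cls, inv) =>
    let dw1 := dw.insert "BOS" ((dw.size : Int) + 1)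
    let dw2 := dw1.insert "EOS" ((dw1.size : Int) + 1)
    (dw2.items, cls.items, inv.items)

-- ===== PORT B =====
def preprocess_model2_alt (allRows : List (List String)) : (List (String × Int)) × (List (String × Int)) × (List (Int × String)) :=
  let rows := allRows.filter (fun r => !r.isEmpty)          -- [r for r in allRows if r]
  match rows.mapM (fun r => PySem.List.pyGet? r 0), rows.mapM (fun r => PySem.List.pyGet? r 1) with
  | some fs, some ss =>
    let words := PySem.List.dedup fs                        -- list(dict.fromkeys(...))
    let classList := PySem.List.dedup ss
    -- {w: i for i, w in enumerate(words, 1)} as the dict-comprehension fold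
    let dw := (PySem.List.enumerate words 1).foldl
      (fun d p => d.insert p.2 p.1) (PySem.Dict.empty : PySem.Dict String Int)
    let cls := (PySem.List.enumerate classList 1).foldl
      (fun d p => d.insert p.2 p.1) (PySem.Dict.empty : PySem.Dict String Int)
    -- {v: k for k, v in classes.items()}
    let inv := cls.items.foldl
      (fun d p => d.insert p.2 p.1) (PySem.Dict.empty : PySem.Dict Int String)
    let dw1 := dw.insert "BOS" ((dw.size : Int) + 1)
    let dw2 := dw1.insert "EOS" ((dw1.size : Int) + 1)
    (dw2.items, cls.items, inv.items)
  | _, _ => ([], [], [])   -- unreachable under Pre_ (the Python raises IndexError there)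

-- ===== PRECONDITION & SPEC =====
-- Pre_ excludes inputs containing a row of length exactly 1: on those both A and B evaluate row[1]
-- and raise IndexError (A returns no value there).
def Pre_preprocess_model2 (allRows : List (List String)) : Prop :=
  ∀ r ∈ allRows, r = [] ∨ 2 ≤ r.length
instance (allRows : List (List String)) : Decidable (Pre_preprocess_model2 allRows) := by
  unfold Pre_preprocess_model2; infer_instance
def pvWitness_preprocess_model2 : List (List String) := [["the", "D"], ["dog", "N"], [], ["the", "D", "x"]]

def Spec_preprocess_model2 (allRows : List (List String)) (out : (List (String × Int)) × (List (String × Int)) × (List (Int × String))) : Prop := out = preprocess_model2_alt allRows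
instance (allRows : List (List String)) (out : (List (String × Int)) × (List (String × Int)) × (List (Int × String))) : Decidable (Spec_preprocess_model2 allRows out) := by unfold Spec_preprocess_model2; infer_instance

-- ===== CLAIM (what is proved, stated in full; the proofs are below) =====
def Claim_equal_preprocess_model2 : Prop := ∀ (allRows : List (List String)), Dom_preprocess_model2 allRows → Pre_preprocess_model2 allRows → Spec_preprocess_model2 allRows (preprocess_model2 allRows)

-- ===== LEMMAS AND PROOFS =====

-- word→index pairs of an (already deduplicated) list, indices from 1
def pvPairs (l : List String) : List (String × Int) :=
  (PySem.List.enumerate l 1).map (fun p => (p.2, p.1))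

-- the dicts A has accumulated after seeing word column l (pvWd) / class column l (pvWd, pvId)
def pvWd (l : List String) : PySem.Dict String Int := PySem.Dict.mk (pvPairs (PySem.List.dedup l))
def pvId (l : List String) : PySem.Dict Int String := PySem.Dict.mk (PySem.List.enumerate (PySem.List.dedup l) 1)

def pvFirsts (rows : List (List String)) : List String :=
  (rows.filter (fun r => !r.isEmpty)).map (fun r => r.headI)
def pvSeconds (rows : List (List String)) : List String :=
  (rows.filter (fun r => !r.isEmpty)).map (fun r => r.tail.headI)

lemma pv_dedup_snoc {α : Type} [BEq α] [LawfulBEq α] (l : List α) (x : α) :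
    PySem.List.dedup (l ++ [x]) =
      if x ∈ l then PySem.List.dedup l else PySem.List.dedup l ++ [x] := by
  show PySem.Set.ofList (l ++ [x]) = _
  rw [PySem.Set.ofList_append_singleton, PySem.Set.add_eq_ite]
  simp [PySem.Set.mem_ofList, PySem.List.dedup]

lemma pv_enumerate_snoc {α : Type} (l : List α) (x : α) (s : Int) :
    PySem.List.enumerate (l ++ [x]) s = PySem.List.enumerate l s ++ [((s + l.length : Int), x)] := by
  induction l generalizing s with
  | nil => simp [PySem.List.enumerate_nil, PySem.List.enumerate_cons]
  | cons a t ih =>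
      simp only [List.cons_append, PySem.List.enumerate_cons, ih, List.length_cons]
      have : s + 1 + (t.length : Int) = s + ((t.length : Int) + 1) := by ring
      rw [this]; norm_cast

lemma pv_pairs_snoc (l : List String) (x : String) :
    pvPairs (l ++ [x]) = pvPairs l ++ [(x, (l.length : Int) + 1)] := by
  simp [pvPairs, pv_enumerate_snoc]
  ring

lemma pv_pairs_fst (l : List String) : (pvPairs l).map Prod.fst = l := by
  simp [pvPairs, List.map_map]
  exact PySem.List.map_snd_enumerate l 1

lemma pv_wd_contains (l : List String) (w : String) :
    (pvWd l).contains w = decide (w ∈ l) := by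
  have h1 : (pvWd l).contains w = decide (w ∈ PySem.List.dedup l) := by
    rw [PySem.Dict.contains_eq_decide_mem_keys]
    congr 1
    show (w ∈ (pvWd l).items.map Prod.fst) = _
    rw [show (pvWd l).items = pvPairs (PySem.List.dedup l) from rfl, pv_pairs_fst]
  rw [h1]
  simp

lemma pv_wd_size (l : List String) : (pvWd l).size = (PySem.List.dedup l).length := by
  simp [pvWd, PySem.Dict.size, pvPairs, PySem.List.length_enumerate]

lemma pv_wd_snoc (l : List String) (w : String) (hw : w ∉ l) :
    (pvWd l).insert w (((pvWd l).size : Int) + 1) = pvWd (l ++ [w]) := by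
  apply PySem.Dict.ext
  rw [PySem.Dict.items_insert_of_not_contains _ _ (by simp [pv_wd_contains, hw])]
  show pvPairs (PySem.List.dedup l) ++ _ = pvPairs (PySem.List.dedup (l ++ [w]))
  rw [pv_dedup_snoc, if_neg hw, pv_pairs_snoc, pv_wd_size]

lemma pv_wd_snoc_mem (l : List String) (w : String) (hw : w ∈ l) : pvWd (l ++ [w]) = pvWd l := by
  unfold pvWd
  rw [pv_dedup_snoc, if_pos hw]

lemma pv_id_contains_big (l : List String) (k : Int) (hk : (PySem.List.dedup l).length < k) :
    (pvId l).contains k = false := by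
  simp only [PySem.Dict.contains, pvId, List.any_eq_false]
  intro p hp
  have := List.mem_map_of_mem (f := Prod.fst) hp
  rw [PySem.List.map_fst_enumerate] at this
  rw [PySem.List.mem_pyRange_one] at this
  have hne : p.1 ≠ k := by omega
  simp [hne]

lemma pv_insert_size (d : PySem.Dict String Int) (c : String) (v : Int) (h : d.contains c = false) :
    (d.insert c v).size = d.size + 1 := by
  simp [PySem.Dict.insert, h, PySem.Dict.size]

lemma pv_id_snoc (l : List String) (c : String) (hc : c ∉ l) :
    (pvId l).insert ((((pvWd l).insert c (((pvWd l).size : Int) + 1)).size : Int)) c = pvId (l ++ [c]) := by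
  have hs : (((pvWd l).insert c (((pvWd l).size : Int) + 1)).size : Int) = ((PySem.List.dedup l).length : Int) + 1 := by
    rw [pv_insert_size _ _ _ (by simp [pv_wd_contains, hc]), pv_wd_size]; push_cast; ring
  rw [hs]
  apply PySem.Dict.ext
  rw [PySem.Dict.items_insert_of_not_contains _ _ (pv_id_contains_big l _ (by omega))]
  show PySem.List.enumerate (PySem.List.dedup l) 1 ++ _ = PySem.List.enumerate (PySem.List.dedup (l ++ [c])) 1
  rw [pv_dedup_snoc, if_neg hc, pv_enumerate_snoc]
  norm_num
  ring

lemma pv_id_snoc_mem (l : List String) (c : String) (hc : c ∈ l) : pvId (l ++ [c]) = pvId l := by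
  unfold pvId
  rw [pv_dedup_snoc, if_pos hc]

lemma pv_get0 (w c : String) (t : List String) : PySem.List.pyGet? (w :: c :: t) 0 = some w := by
  simp [PySem.List.pyGet?, PySem.List.pyIdx?]
  rw [if_pos (by omega)]
  rfl

lemma pv_get1 (w c : String) (t : List String) : PySem.List.pyGet? (w :: c :: t) 1 = some c := by
  simp [PySem.List.pyGet?, PySem.List.pyIdx?]

lemma pv_stepA_eq (fs ss : List String) (w c : String) (t : List String) :
    pvStepA (some (pvWd fs, pvWd ss, pvId ss)) (w :: c :: t) =
      some (pvWd (fs ++ [w]), pvWd (ss ++ [c]), pvId (ss ++ [c])) := by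
  simp only [pvStepA, List.length_cons, pv_get0, pv_get1]
  norm_num
  have hdw : (if (pvWd fs).contains w = true then pvWd fs
      else (pvWd fs).insert w (((pvWd fs).size : Int) + 1)) = pvWd (fs ++ [w]) := by
    by_cases hw : w ∈ fs
    · rw [pv_wd_contains, decide_eq_true hw, if_pos rfl, pv_wd_snoc_mem fs w hw]
    · rw [pv_wd_contains, decide_eq_false hw]
      simp only [Bool.false_eq_true, if_false]
      exact pv_wd_snoc fs w hw
  rw [hdw]
  by_cases hc : c ∈ ss
  · rw [pv_wd_contains, decide_eq_true hc, if_pos rfl, pv_wd_snoc_mem ss c hc, pv_id_snoc_mem ss c hc]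
  · rw [pv_wd_contains, decide_eq_false hc]
    simp only [Bool.false_eq_true, if_false]
    rw [pv_id_snoc ss c hc, pv_wd_snoc ss c hc]

lemma pv_foldA (rows : List (List String)) (fs ss : List String)
    (h : ∀ r ∈ rows, r = [] ∨ 2 ≤ r.length) :
    rows.foldl pvStepA (some (pvWd fs, pvWd ss, pvId ss)) =
      some (pvWd (fs ++ pvFirsts rows), pvWd (ss ++ pvSeconds rows), pvId (ss ++ pvSeconds rows)) := by
  induction rows generalizing fs ss with
  | nil => simp [pvFirsts, pvSeconds]
  | cons r rest ih =>
      have hr := h r (by simp)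
      have hrest : ∀ r ∈ rest, r = [] ∨ 2 ≤ r.length := fun r hmem => h r (by simp [hmem])
      match r, hr with
      | [], _ =>
          rw [List.foldl_cons]
          have : pvStepA (some (pvWd fs, pvWd ss, pvId ss)) [] = some (pvWd fs, pvWd ss, pvId ss) := by
            simp [pvStepA]
          rw [this, ih fs ss hrest]
          simp [pvFirsts, pvSeconds]
      | w :: c :: t, _ =>
          rw [List.foldl_cons, pv_stepA_eq, ih (fs ++ [w]) (ss ++ [c]) hrest]
          simp [pvFirsts, pvSeconds]

lemma pv_mapM_get0 (rs : List (List String)) (h : ∀ r ∈ rs, r ≠ []) :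
    rs.mapM (fun r => PySem.List.pyGet? r 0) = some (rs.map (fun r => r.headI)) := by
  induction rs with
  | nil => rfl
  | cons r rest ih =>
      match r, h r (by simp) with
      | a :: t, _ =>
          have h0 : PySem.List.pyGet? (a :: t) 0 = some a := by
            simp [PySem.List.pyGet?, PySem.List.pyIdx?]
          rw [List.mapM_cons, h0, ih (fun r hm => h r (by simp [hm]))]
          rfl

lemma pv_mapM_get1 (rs : List (List String)) (h : ∀ r ∈ rs, 2 ≤ r.length) :
    rs.mapM (fun r => PySem.List.pyGet? r 1) = some (rs.map (fun r => r.tail.headI)) := by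
  induction rs with
  | nil => rfl
  | cons r rest ih =>
      have hlen := h r (by simp)
      match r, hlen with
      | a :: b :: t, _ =>
          rw [List.mapM_cons, pv_get1, ih (fun r hm => h r (by simp [hm]))]
          rfl

lemma pv_B_dw (l : List String) :
    ((PySem.List.enumerate (PySem.List.dedup l) 1).foldl
      (fun d p => d.insert p.2 p.1) (PySem.Dict.empty : PySem.Dict String Int)) = pvWd l := by
  apply PySem.Dict.ext
  have hn : (List.map (fun p => p.2) (PySem.List.enumerate (PySem.List.dedup l) 1)).Nodup := by
    rw [PySem.List.map_snd_enumerate]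
    exact PySem.List.nodup_dedup l
  have h := PySem.Dict.items_foldl_insert_fresh (PySem.List.enumerate (PySem.List.dedup l) 1)
    (fun p => p.2) (fun p => p.1) (PySem.Dict.empty : PySem.Dict String Int)
    (fun a _ => PySem.Dict.contains_empty _) hn
  simp only at h
  rw [h]
  rfl

lemma pv_B_inv (l : List String) :
    ((pvWd l).items.foldl (fun d p => d.insert p.2 p.1) (PySem.Dict.empty : PySem.Dict Int String)) = pvId l := by
  apply PySem.Dict.ext
  have hn : (List.map (fun p => p.2) ((pvWd l).items)).Nodup := by
    show (List.map (fun p => p.2) (pvPairs (PySem.List.dedup l))).Nodup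
    rw [show List.map (fun p => p.2) (pvPairs (PySem.List.dedup l)) =
        List.map Prod.fst (PySem.List.enumerate (PySem.List.dedup l) 1) from by
      simp [pvPairs, List.map_map]]
    rw [PySem.List.map_fst_enumerate]
    exact PySem.List.nodup_pyRange_one _ _
  have h := PySem.Dict.items_foldl_insert_fresh ((pvWd l).items)
    (fun p => p.2) (fun p => p.1) (PySem.Dict.empty : PySem.Dict Int String)
    (fun a _ => PySem.Dict.contains_empty _) hn
  simp only at h
  rw [h]
  show [] ++ List.map _ (pvPairs (PySem.List.dedup l)) = PySem.List.enumerate (PySem.List.dedup l) 1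
  simp only [List.nil_append, pvPairs, List.map_map]
  have : ((fun (a : String × Int) => (a.2, a.1)) ∘ fun (p : Int × String) => (p.2, p.1)) = id := by
    funext p; cases p; rfl
  rw [this, List.map_id]

lemma pv_main (allRows : List (List String)) (hpre : ∀ r ∈ allRows, r = [] ∨ 2 ≤ r.length) :
    preprocess_model2 allRows = preprocess_model2_alt allRows := by
  have hne : ∀ r ∈ allRows.filter (fun r => !r.isEmpty), r ≠ [] := by
    intro r hr
    rcases List.mem_filter.mp hr with ⟨_, hflag⟩
    intro hnil; subst hnil; simp at hflag
  have h2 : ∀ r ∈ allRows.filter (fun r => !r.isEmpty), 2 ≤ r.length := by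
    intro r hr
    rcases List.mem_filter.mp hr with ⟨hmem, hflag⟩
    rcases hpre r hmem with hnil | hlen
    · subst hnil; simp at hflag
    · exact hlen
  unfold preprocess_model2 preprocess_model2_alt
  rw [show (some ((PySem.Dict.empty : PySem.Dict String Int), (PySem.Dict.empty : PySem.Dict String Int),
        (PySem.Dict.empty : PySem.Dict Int String))) = some (pvWd [], pvWd [], pvId []) from rfl,
      pv_foldA allRows [] [] hpre]
  simp only [pv_mapM_get0 _ hne, pv_mapM_get1 _ h2, List.nil_append, pv_B_dw, pv_B_inv, pvFirsts, pvSeconds]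

-- ===== VERDICT (by name: the statement is the Claim_ definition above) =====
theorem preprocess_model2_spec : Claim_equal_preprocess_model2 := by
  intro allRows _ hpre
  show preprocess_model2 allRows = preprocess_model2_alt allRows
  exact pv_main allRows hpre
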